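-- pv_equiv track=rewrite | github.com/avllgrn/2CM8Parcial1 | ejemplo.py | generaTriangularSuperiorIzqDerArrAba
-- ===== SOURCE A (Python) =====
-- def generaMatrizCeros(m, n):
--     M = []
--     for i in range(m):
--         fila = []
--         for j in range(n):
--             fila.append( 0 )
--         M.append( fila )
--     return M
--
-- def generaTriangularSuperiorIzqDerArrAba(n, ini, inc):
--     M = generaMatrizCeros(n,n)
--     contador = ini
--     for i in range(n):
--         for j in range(n):
--             if i<=j:
--                 M[i][j] = contador
--                 contador += inc
--     return M
-- ===== SOURCE B (Python) =====
-- def generaTriangularSuperiorIzqDerArrAba(n, ini, inc):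
--     # Build each row directly: i leading zeros, then closed-form sequence values.
--     return [[0] * i + [ini + inc * (i * n - i * (i - 1) // 2 + (j - i)) for j in range(i, n)]
--             for i in range(n)]
-- ===== Notes on version B (the rewrite author's own statement) =====
-- stated objective: alternative
-- what changed: B replaces A's mutable zero matrix plus running counter with a direct per-row construction: each row is i zeros followed by values computed from the closed-form position index ini + inc*(i*n - i*(i-1)//2 + (j-i)); no mutation and no accumulator.
import Mathlib
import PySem

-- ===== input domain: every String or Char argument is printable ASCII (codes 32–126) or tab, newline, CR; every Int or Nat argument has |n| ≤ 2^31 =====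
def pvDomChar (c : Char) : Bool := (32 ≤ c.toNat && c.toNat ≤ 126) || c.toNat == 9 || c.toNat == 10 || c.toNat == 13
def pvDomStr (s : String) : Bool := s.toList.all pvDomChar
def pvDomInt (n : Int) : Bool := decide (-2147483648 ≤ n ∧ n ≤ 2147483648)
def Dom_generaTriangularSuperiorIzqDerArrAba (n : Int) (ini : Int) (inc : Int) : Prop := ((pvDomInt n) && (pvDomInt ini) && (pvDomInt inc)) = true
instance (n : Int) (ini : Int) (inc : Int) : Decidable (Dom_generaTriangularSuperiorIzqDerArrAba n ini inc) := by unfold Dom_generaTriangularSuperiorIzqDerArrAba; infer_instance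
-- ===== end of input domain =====

-- B builds each row directly with a closed-form index (no running counter, no mutable zero matrix); same result, different decomposition.

-- ===== PORT A =====
def generaMatrizCeros (m : Int) (n : Int) : List (List Int) :=
  (PySem.List.pyRange 0 m 1).foldl
    (fun M _ =>
      M ++ [(PySem.List.pyRange 0 n 1).foldl (fun fila _ => fila ++ [(0 : Int)]) []]) []

def generaTriangularSuperiorIzqDerArrAba (n : Int) (ini : Int) (inc : Int) : List (List Int) :=
  let M0 := generaMatrizCeros n n
  let st :=
    (PySem.List.pyRange 0 n 1).foldl
      (fun (st : List (List Int) × Int) i =>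
        (PySem.List.pyRange 0 n 1).foldl
          (fun (st : List (List Int) × Int) j =>
            if i ≤ j then
              (st.1.set i.toNat ((st.1.getD i.toNat []).set j.toNat st.2), st.2 + inc)
            else st) st) (M0, ini)
  st.1

-- ===== PORT B =====
def generaTriangularSuperiorIzqDerArrAba_alt (n : Int) (ini : Int) (inc : Int) : List (List Int) :=
  (PySem.List.pyRange 0 n 1).map (fun i =>
    List.replicate i.toNat (0 : Int) ++
    (PySem.List.pyRange i n 1).map (fun j =>
      ini + inc * (i * n - PySem.Int.floordiv (i * (i - 1)) 2 + (j - i))))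

-- ===== PRECONDITION & SPEC =====
def Spec_generaTriangularSuperiorIzqDerArrAba (n : Int) (ini : Int) (inc : Int) (out : List (List Int)) : Prop := out = generaTriangularSuperiorIzqDerArrAba_alt n ini inc
instance (n : Int) (ini : Int) (inc : Int) (out : List (List Int)) : Decidable (Spec_generaTriangularSuperiorIzqDerArrAba n ini inc out) := by unfold Spec_generaTriangularSuperiorIzqDerArrAba; infer_instance

-- ===== CLAIM (what is proved, stated in full; the proofs are below) =====
def Claim_equal_generaTriangularSuperiorIzqDerArrAba : Prop := ∀ (n : Int) (ini : Int) (inc : Int), Dom_generaTriangularSuperiorIzqDerArrAba n ini inc → Spec_generaTriangularSuperiorIzqDerArrAba n ini inc (generaTriangularSuperiorIzqDerArrAba n ini inc)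

-- ===== LEMMAS AND PROOFS =====

-- Rows i, i+1, …, n-1 of the intended matrix, where row i starts with counter value c.
def rowsAux (n : Int) (inc : Int) : Nat → Int → Int → List (List Int)
  | 0, _, _ => []
  | k+1, i, c =>
      (List.replicate i.toNat (0 : Int) ++ (PySem.List.pyRange i n 1).map (fun j => c + inc * (j - i)))
      :: rowsAux n inc k (i+1) (c + inc * (n - i))

lemma gmc_eq (m n : Int) :
    generaMatrizCeros m n = List.replicate m.toNat (List.replicate n.toNat (0 : Int)) := by
  unfold generaMatrizCeros
  rw [PySem.List.foldl_append_singleton_eq_map, PySem.List.foldl_append_singleton_eq_map]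
  simp [List.map_const', PySem.List.length_pyRange_one]

-- The inner loop skips every j with j < i (the `if i ≤ j` branch never fires).
lemma skip_lemma (inc i : Int) (l : List Int) (hl : ∀ j ∈ l, j < i)
    (st : List (List Int) × Int) :
    l.foldl
      (fun (st : List (List Int) × Int) j =>
        if i ≤ j then
          (st.1.set i.toNat ((st.1.getD i.toNat []).set j.toNat st.2), st.2 + inc)
        else st) st = st := by
  induction l generalizing st with
  | nil => rfl
  | cons a t ih =>
    have ha : a < i := hl a (by simp)
    simp only [List.foldl_cons, if_neg (by omega : ¬ i ≤ a)]
    exact ih (fun j hj => hl j (by simp [hj])) st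

-- The inner loop from column a onward fills row i's tail with c, c+inc, … and advances the counter by inc·k.
lemma inner_lemma (n inc i : Int) (hi : 0 ≤ i) :
    ∀ (k : Nat) (a : Int), i ≤ a → a + (k : Int) = n →
    ∀ (M : List (List Int)) (c : Int) (pre : List Int),
      i.toNat < M.length → M.getD i.toNat [] = pre ++ List.replicate k (0 : Int) →
      pre.length = a.toNat →
      (PySem.List.pyRange a n 1).foldl
        (fun (st : List (List Int) × Int) j =>
          if i ≤ j then
            (st.1.set i.toNat ((st.1.getD i.toNat []).set j.toNat st.2), st.2 + inc)
          else st) (M, c)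
      = (M.set i.toNat (pre ++ (PySem.List.pyRange a n 1).map (fun j => c + inc * (j - a))),
         c + inc * (k : Int)) := by
  intro k
  induction k with
  | zero =>
    intro a hia hak M c pre hlen hrow hpre
    rw [PySem.List.pyRange_one_eq_nil (show n ≤ a by omega)]
    simp only [List.foldl_nil, List.map_nil, List.append_nil, Nat.cast_zero, mul_zero, add_zero]
    have hget : M.getD i.toNat [] = M[i.toNat] := by
      simp [List.getD, List.getElem?_eq_getElem hlen]
    rw [show pre = M[i.toNat] by rw [← hget, hrow]; simp]
    rw [List.set_getElem_self hlen]
  | succ k ih =>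
    intro a hia hak M c pre hlen hrow hpre
    have han : a < n := by omega
    rw [PySem.List.pyRange_one_cons han]
    simp only [List.foldl_cons, if_pos hia]
    have hrow' : (M.getD i.toNat []).set a.toNat c
        = (pre ++ [c]) ++ List.replicate k (0 : Int) := by
      rw [hrow, List.replicate_succ, ← hpre]
      simp
    set M' := M.set i.toNat ((M.getD i.toNat []).set a.toNat c) with hM'
    have hlen' : i.toNat < M'.length := by simpa [hM'] using hlen
    have hget' : M'.getD i.toNat [] = (pre ++ [c]) ++ List.replicate k (0 : Int) := by
      rw [hM', ← hrow']
      simp [List.getD, hlen]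
    have hpre' : (pre ++ [c]).length = (a + 1).toNat := by
      simp [hpre]; omega
    rw [ih (a + 1) (by omega) (by omega) M' (c + inc) (pre ++ [c]) hlen' hget' hpre']
    rw [Prod.mk.injEq]
    refine ⟨?_, by push_cast; ring⟩
    rw [hM', List.set_set]
    congr 1
    rw [List.append_assoc, List.singleton_append, List.map_cons]
    congr 1
    exact congrArg₂ List.cons (by ring) (List.map_congr_left fun j _ => by ring)

-- The outer loop, having produced rows P (one per i already done), appends rowsAux.
lemma outer_lemma (n inc : Int) :
    ∀ (k : Nat) (i : Int), 0 ≤ i → i + (k : Int) = n →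
    ∀ (P : List (List Int)) (c : Int), P.length = i.toNat →
    ((PySem.List.pyRange i n 1).foldl
      (fun (st : List (List Int) × Int) i' =>
        (PySem.List.pyRange 0 n 1).foldl
          (fun (st : List (List Int) × Int) j =>
            if i' ≤ j then
              (st.1.set i'.toNat ((st.1.getD i'.toNat []).set j.toNat st.2), st.2 + inc)
            else st) st)
      (P ++ List.replicate k (List.replicate n.toNat (0 : Int)), c)).1
    = P ++ rowsAux n inc k i c := by
  intro k
  induction k with
  | zero =>
    intro i hi hik P c hP
    rw [PySem.List.pyRange_one_eq_nil (show n ≤ i by omega)]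
    simp [rowsAux]
  | succ k ih =>
    intro i hi hik P c hP
    have hin : i < n := by omega
    have hM : (P ++ List.replicate (k+1) (List.replicate n.toNat (0 : Int))).getD i.toNat []
        = List.replicate i.toNat (0 : Int) ++ List.replicate (n.toNat - i.toNat) (0 : Int) := by
      rw [← hP]
      simp [List.getD]
      omega
    have hlen : i.toNat < (P ++ List.replicate (k+1) (List.replicate n.toNat (0 : Int))).length := by
      simp [← hP]
    have hstep :
        (PySem.List.pyRange 0 n 1).foldl
          (fun (st : List (List Int) × Int) j =>
            if i ≤ j then
              (st.1.set i.toNat ((st.1.getD i.toNat []).set j.toNat st.2), st.2 + inc)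
            else st)
          (P ++ List.replicate (k+1) (List.replicate n.toNat (0 : Int)), c)
        = ((P ++ [List.replicate i.toNat (0 : Int) ++ (PySem.List.pyRange i n 1).map (fun j => c + inc * (j - i))])
             ++ List.replicate k (List.replicate n.toNat (0 : Int)), c + inc * (n - i)) := by
      rw [PySem.List.pyRange_one_append 0 i n hi (by omega), List.foldl_append]
      rw [skip_lemma inc i _ (fun j hj => (PySem.List.mem_pyRange_one.mp hj).2)]
      rw [inner_lemma n inc i hi (n.toNat - i.toNat) i (le_refl i) (by omega) _ c
           (List.replicate i.toNat (0 : Int)) hlen hM (by simp)]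
      rw [Prod.mk.injEq]
      constructor
      · rw [← hP, List.replicate_succ]
        simp
      · congr 1; congr 1; omega
    rw [PySem.List.pyRange_one_cons hin]
    simp only [List.foldl_cons]
    rw [hstep]
    rw [ih (i+1) (by omega) (by omega) _ (c + inc * (n - i)) (by simp [hP]; omega)]
    simp [rowsAux]

-- B's closed-form rows are exactly rowsAux with the counter written in closed form.
lemma alt_lemma (n ini inc : Int) :
    ∀ (k : Nat) (i : Int), 0 ≤ i → i + (k : Int) = n →
    (PySem.List.pyRange i n 1).map (fun i' =>
      List.replicate i'.toNat (0 : Int) ++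
      (PySem.List.pyRange i' n 1).map (fun j =>
        ini + inc * (i' * n - PySem.Int.floordiv (i' * (i' - 1)) 2 + (j - i'))))
    = rowsAux n inc k i (ini + inc * (i * n - PySem.Int.floordiv (i * (i - 1)) 2)) := by
  intro k
  induction k with
  | zero =>
    intro i hi hik
    rw [PySem.List.pyRange_one_eq_nil (by omega)]
    rfl
  | succ k ih =>
    intro i hi hik
    have hin : i < n := by omega
    rw [PySem.List.pyRange_one_cons hin]
    simp only [List.map_cons, rowsAux, List.cons.injEq]
    constructor
    · congr 1
      exact List.map_congr_left (fun j _ => by ring)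
    · rw [ih (i+1) (by omega) (by omega)]
      congr 1
      rw [PySem.Int.floordiv_eq_ediv_of_pos (by norm_num),
          PySem.Int.floordiv_eq_ediv_of_pos (by norm_num)]
      have h1 : (i + 1) * ((i + 1) - 1) = i * (i - 1) + i * 2 := by ring
      rw [h1, Int.add_mul_ediv_right _ _ (by norm_num)]
      ring

-- ===== VERDICT (by name: the statement is the Claim_ definition above) =====
theorem generaTriangularSuperiorIzqDerArrAba_spec : Claim_equal_generaTriangularSuperiorIzqDerArrAba := by
  intro n ini inc _
  unfold Spec_generaTriangularSuperiorIzqDerArrAba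
  unfold generaTriangularSuperiorIzqDerArrAba generaTriangularSuperiorIzqDerArrAba_alt
  by_cases hn : 0 ≤ n
  · rw [gmc_eq]
    have hA := outer_lemma n inc n.toNat 0 (le_refl 0) (by omega) [] ini (by simp)
    simp only [List.nil_append] at hA
    rw [hA]
    rw [alt_lemma n ini inc n.toNat 0 (le_refl 0) (by omega)]
    norm_num [PySem.Int.floordiv]
  · have h0 : n ≤ 0 := by omega
    rw [PySem.List.pyRange_one_eq_nil h0]
    simp [gmc_eq, Int.toNat_of_nonpos h0]
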